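-- pv_equiv track=rewrite | github.com/tahmid-tanzim/problem-solving | Greedy_Algorithms/Class-Photos.py | classPhotos
-- ===== SOURCE A (Python) =====
-- def classPhotos(redShirtHeights, blueShirtHeights):
--     redShirtHeights.sort()
--     blueShirtHeights.sort()
--
--     if redShirtHeights[0] > blueShirtHeights[0]:
--         frontRow, backRow = blueShirtHeights, redShirtHeights
--     else:
--         frontRow, backRow = redShirtHeights, blueShirtHeights
--
--     for frontHeight, backHeight in zip(frontRow, backRow):
--         if backHeight <= frontHeight:
--             return False
--
--     return True
-- ===== SOURCE B (Python) =====
-- def classPhotos(redShirtHeights, blueShirtHeights):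
--     # Selection-based check: never sorts; repeatedly extracts the minimum of
--     # each group and compares the pair, direction chosen from the overall
--     # minima.  Does not mutate its arguments (A sorts them in place);
--     # equivalence is about the return value.
--     r = list(redShirtHeights)
--     b = list(blueShirtHeights)
--     if r and b and min(r) > min(b):
--         r, b = b, r
--     while r and b:
--         front, back = min(r), min(b)
--         if back <= front:
--             return False
--         r.remove(front)
--         b.remove(back)
--     return True
-- ===== Notes on version B (the rewrite author's own statement) =====
-- stated objective: alternative
-- what changed: Replaces sort-then-zip-scan by repeated minimum extraction: B never sorts, it repeatedly removes the minimum of each group and compares the pair, with the comparison direction chosen from the two overall minima; B also does not mutate its arguments (A sorts them in place).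
import Mathlib
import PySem

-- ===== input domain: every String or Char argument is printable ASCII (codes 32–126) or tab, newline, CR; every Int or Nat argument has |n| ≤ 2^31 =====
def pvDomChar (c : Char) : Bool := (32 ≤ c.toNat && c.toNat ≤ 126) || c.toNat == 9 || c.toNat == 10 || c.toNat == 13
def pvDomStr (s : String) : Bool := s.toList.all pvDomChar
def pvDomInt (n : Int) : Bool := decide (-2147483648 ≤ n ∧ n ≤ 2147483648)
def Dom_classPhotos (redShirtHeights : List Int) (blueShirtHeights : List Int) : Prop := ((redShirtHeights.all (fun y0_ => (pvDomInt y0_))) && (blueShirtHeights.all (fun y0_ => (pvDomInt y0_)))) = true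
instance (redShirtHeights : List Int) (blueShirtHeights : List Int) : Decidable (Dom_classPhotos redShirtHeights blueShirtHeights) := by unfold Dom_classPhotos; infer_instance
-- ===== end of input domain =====

-- B replaces A's sort-then-zip-scan by repeated minimum extraction (no sorting at all);
-- objective: alternative algorithm, same result.  A sorts its arguments IN PLACE and B does
-- not mutate them: the equivalence proved here is about the RETURN value only.

-- ===== PORT A =====
-- A's for-loop over zip(frontRow, backRow) with early return False
def classPhotosLoop : List (Int × Int) → Bool
  | [] => true
  | (frontHeight, backHeight) :: rest =>
      if backHeight ≤ frontHeight then false else classPhotosLoop rest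

def classPhotos (redShirtHeights : List Int) (blueShirtHeights : List Int) : Bool :=
  let red := PySem.List.sorted redShirtHeights (fun x => x) false
  let blue := PySem.List.sorted blueShirtHeights (fun x => x) false
  match red, blue with
  | r0 :: rt, b0 :: bt =>
      if r0 > b0 then
        classPhotosLoop (List.zip (b0 :: bt) (r0 :: rt))
      else
        classPhotosLoop (List.zip (r0 :: rt) (b0 :: bt))
  | _, _ => false   -- unreachable under Pre_ (Python raises IndexError on an empty list)

-- ===== PORT B =====
-- B's while-loop: extract the minimum of each group, compare, remove, repeat.
def classPhotosAltLoop (r b : List Int) : Bool :=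
  match hr : PySem.List.min? r (fun x => x), hb : PySem.List.min? b (fun x => x) with
  | some front, some back =>
      if back ≤ front then false
      else
        match hr' : PySem.List.remove? r front, hb' : PySem.List.remove? b back with
        | some r', some b' => classPhotosAltLoop r' b'
        | _, _ => false   -- unreachable: the minimum is a member
  | _, _ => true          -- 'while r and b' exits when either list is empty
termination_by r.length
decreasing_by
  have hm : front ∈ r := PySem.List.min?_mem hr
  have : PySem.List.remove? r front = some (r.erase front) :=
    PySem.List.remove?_eq_some_erase r front hm
  rw [this] at hr'
  cases hr'
  have h1 := List.length_erase_of_mem hm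
  have h2 := List.length_pos_of_mem hm
  omega

def classPhotos_alt (redShirtHeights : List Int) (blueShirtHeights : List Int) : Bool :=
  let r := redShirtHeights
  let b := blueShirtHeights
  -- 'if r and b and min(r) > min(b): r, b = b, r' (short-circuit: no swap when either is empty)
  match PySem.List.min? r (fun x => x), PySem.List.min? b (fun x => x) with
  | some mr, some mb =>
      if mr > mb then classPhotosAltLoop b r else classPhotosAltLoop r b
  | _, _ => classPhotosAltLoop r b

-- ===== PRECONDITION & SPEC =====
-- Pre_ excludes exactly the inputs where Python A raises IndexError: an empty list.
def Pre_classPhotos (redShirtHeights : List Int) (blueShirtHeights : List Int) : Prop :=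
  redShirtHeights ≠ [] ∧ blueShirtHeights ≠ []
instance (redShirtHeights : List Int) (blueShirtHeights : List Int) : Decidable (Pre_classPhotos redShirtHeights blueShirtHeights) := by unfold Pre_classPhotos; infer_instance

def pvWitness_classPhotos : List Int × List Int := ([2, 1, 3], [4, 5, 6])

def Spec_classPhotos (redShirtHeights : List Int) (blueShirtHeights : List Int) (out : Bool) : Prop := out = classPhotos_alt redShirtHeights blueShirtHeights
instance (redShirtHeights : List Int) (blueShirtHeights : List Int) (out : Bool) : Decidable (Spec_classPhotos redShirtHeights blueShirtHeights out) := by unfold Spec_classPhotos; infer_instance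

-- ===== CLAIM (what is proved, stated in full; the proofs are below) =====
def Claim_equal_classPhotos : Prop := ∀ (redShirtHeights : List Int) (blueShirtHeights : List Int), Dom_classPhotos redShirtHeights blueShirtHeights → Pre_classPhotos redShirtHeights blueShirtHeights → Spec_classPhotos redShirtHeights blueShirtHeights (classPhotos redShirtHeights blueShirtHeights)

-- ===== LEMMAS AND PROOFS =====
-- Peeling the minimum off names the sorted list: sorted(l) = min(l) :: sorted(l with one min removed).
theorem sorted_cons_min (l : List Int) (m : Int)
    (hm : PySem.List.min? l (fun x => x) = some m) :
    PySem.List.sorted l (fun x => x) false =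
      m :: PySem.List.sorted (l.erase m) (fun x => x) false := by
  have hmem : m ∈ l := PySem.List.min?_mem hm
  have hmin : ∀ y ∈ l, m ≤ y := by
    intro y hy; simpa using PySem.List.min?_isMin hm y hy
  have hperm : (m :: PySem.List.sorted (l.erase m) (fun x : Int => x) false).Perm l :=
    ((PySem.List.sorted_perm _ _ _).cons m).trans (List.perm_cons_erase hmem).symm
  have hpair : (m :: PySem.List.sorted (l.erase m) (fun x : Int => x) false).Pairwise (· ≤ ·) := by
    refine List.pairwise_cons.mpr ⟨?_, ?_⟩
    · intro y hy
      exact hmin y (List.mem_of_mem_erase ((PySem.List.mem_sorted _ _ _ _).mp hy))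
    · simpa using PySem.List.sorted_pairwise (l.erase m) (fun x : Int => x)
  exact PySem.List.sorted_id_eq_of_perm_of_pairwise _ _ hperm hpair

-- B's extraction loop computes A's scan of the zipped sorted lists.
theorem altLoop_eq_loop_sorted (r b : List Int) :
    classPhotosAltLoop r b =
      classPhotosLoop (List.zip (PySem.List.sorted r (fun x => x) false)
        (PySem.List.sorted b (fun x => x) false)) := by
  generalize hn : r.length = n
  induction n using Nat.strong_induction_on generalizing r b with
  | _ n ih =>
  rw [classPhotosAltLoop.eq_def]
  split
  case h_2 hor =>
    -- either list is empty ('while r and b' exits): both sides are true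
    by_cases hre : r = []
    · subst hre; simp [PySem.List.sorted, classPhotosLoop]
    · have hbe : b = [] := by
        by_contra hbe
        obtain ⟨mr, hmr⟩ := Option.ne_none_iff_exists'.mp
          (fun h => hre ((PySem.List.min?_eq_none_iff _ _).mp h) :
            PySem.List.min? r (fun x => x) ≠ none)
        obtain ⟨mb, hmb⟩ := Option.ne_none_iff_exists'.mp
          (fun h => hbe ((PySem.List.min?_eq_none_iff _ _).mp h) :
            PySem.List.min? b (fun x => x) ≠ none)
        exact hor mr mb hmr hmb
      subst hbe; simp [PySem.List.sorted, classPhotosLoop, List.zip]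
  case h_1 mr mb hr hb =>
    have hmemr : mr ∈ r := PySem.List.min?_mem hr
    have hmemb : mb ∈ b := PySem.List.min?_mem hb
    have hsr := sorted_cons_min r mr hr
    have hsb := sorted_cons_min b mb hb
    rw [hsr, hsb]
    have hremr : PySem.List.remove? r mr = some (r.erase mr) :=
      PySem.List.remove?_eq_some_erase r mr hmemr
    have hremb : PySem.List.remove? b mb = some (b.erase mb) :=
      PySem.List.remove?_eq_some_erase b mb hmemb
    by_cases hle : mb ≤ mr
    · simp [hle, List.zip, classPhotosLoop]
    · rw [if_neg hle]
      have hlen : (r.erase mr).length < n := by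
        have h1 := List.length_erase_of_mem hmemr
        have h2 := List.length_pos_of_mem hmemr
        omega
      split
      case h_1 r' b' hr' hb' =>
        rw [hremr] at hr'; rw [hremb] at hb'
        cases hr'; cases hb'
        rw [ih _ hlen _ _ rfl]
        simp [List.zip, classPhotosLoop, hle]
      case h_2 hor =>
        exact (hor _ _ hremr hremb).elim

-- ===== VERDICT (by name: the statement is the Claim_ definition above) =====
theorem classPhotos_spec : Claim_equal_classPhotos := by
  intro red blue _ hpre
  unfold Spec_classPhotos classPhotos classPhotos_alt
  obtain ⟨hr, hb⟩ := hpre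
  obtain ⟨mr, hmr⟩ := Option.ne_none_iff_exists'.mp
    (fun h => hr ((PySem.List.min?_eq_none_iff _ _).mp h) : PySem.List.min? red (fun x => x) ≠ none)
  obtain ⟨mb, hmb⟩ := Option.ne_none_iff_exists'.mp
    (fun h => hb ((PySem.List.min?_eq_none_iff _ _).mp h) : PySem.List.min? blue (fun x => x) ≠ none)
  rw [sorted_cons_min red mr hmr, sorted_cons_min blue mb hmb]
  simp only [hmr, hmb]
  by_cases h : mr > mb
  · rw [if_pos h, if_pos h, altLoop_eq_loop_sorted,
      sorted_cons_min red mr hmr, sorted_cons_min blue mb hmb]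
  · rw [if_neg h, if_neg h, altLoop_eq_loop_sorted,
      sorted_cons_min red mr hmr, sorted_cons_min blue mb hmb]
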